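-- pv_equiv track=rewrite | github.com/se0nShine/Embedded20th_Humanoid_competition | pickObject2.py | command_direction
-- ===== SOURCE A (Python) =====
-- viewSize = (320, int(320 / 1.333))
--
-- def command_direction(rects):
--     w_view = viewSize[0]
--     h_view = viewSize[1]
--     for rect in rects:
--         center_point=(int(rect['cx']),int(rect['cy']))
--
--     if (center_point[0]<=int(w_view*0.33))and (center_point[1]<=int(h_view*0.33)):
--         return 171
--     elif(center_point[0]<=int(w_view*0.33*2))and (center_point[1]<=int(h_view*0.33)):
--         return 172
--     elif (center_point[0] <= int(w_view)) and (center_point[1] <= int(h_view * 0.33)):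
--         return 173
--     elif (center_point[0] <= int(w_view * 0.33)) and (center_point[1] <= int(h_view * 0.33*2)):
--         return 174
--     elif (center_point[0] <= int(w_view * 0.33 * 2)) and (center_point[1] <= int(h_view * 0.33*2)):
--         return 175
--     elif (center_point[0] <= int(w_view)) and (center_point[1] <= int(h_view * 0.33*2)):
--         return 176
--     elif (center_point[0] <= int(w_view * 0.33)) and (center_point[1] <= int(h_view)):
--         return 177
--     elif (center_point[0] <= int(w_view * 0.33 * 2)) and (center_point[1] <= int(h_view)):
--         return 178
--     elif (center_point[0] <= int(w_view)) and (center_point[1] <= int(h_view)):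
--         return 179
-- ===== SOURCE B (Python) =====
-- viewSize = (320, int(320 / 1.333))
--
-- def command_direction(rects):
--     w_view, h_view = viewSize
--     rect = rects[-1]
--     cx, cy = int(rect['cx']), int(rect['cy'])
--     cols = [int(w_view * 0.33), int(w_view * 0.33 * 2), int(w_view)]
--     rows = [int(h_view * 0.33), int(h_view * 0.33 * 2), int(h_view)]
--     col = next((i for i, t in enumerate(cols) if cx <= t), None)
--     row = next((i for i, t in enumerate(rows) if cy <= t), None)
--     if col is None or row is None:
--         return None
--     return 171 + 3 * row + col
-- ===== Notes on version B (the rewrite author's own statement) =====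
-- stated objective: simpler
-- what changed: Replaces the loop over all rects plus a 9-branch if/elif ladder by reading only the last rect and computing the region code arithmetically as 171 + 3*row + col from two 3-element threshold searches.
import Mathlib
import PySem

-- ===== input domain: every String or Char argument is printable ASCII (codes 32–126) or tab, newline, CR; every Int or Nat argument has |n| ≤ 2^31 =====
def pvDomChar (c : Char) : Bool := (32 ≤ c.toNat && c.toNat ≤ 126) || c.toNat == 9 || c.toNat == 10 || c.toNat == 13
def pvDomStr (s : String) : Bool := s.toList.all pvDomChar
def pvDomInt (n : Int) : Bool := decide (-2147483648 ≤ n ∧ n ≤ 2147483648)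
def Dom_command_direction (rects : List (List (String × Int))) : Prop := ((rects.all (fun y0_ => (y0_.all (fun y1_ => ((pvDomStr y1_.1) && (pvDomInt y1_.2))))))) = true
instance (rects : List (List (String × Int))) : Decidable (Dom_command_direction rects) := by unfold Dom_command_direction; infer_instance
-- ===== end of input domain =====

-- B reads only the last rect and computes the 3x3 region code arithmetically as 171 + 3*row + col
-- instead of A's loop over all rects plus a 9-branch if/elif ladder (objective: simpler).

-- ===== PORT A =====
-- The float thresholds are compile-time constants of A:
-- int(320*0.33)=105, int(320*0.33*2)=211, w_view=320, h_view=int(320/1.333)=240,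
-- int(240*0.33)=79, int(240*0.33*2)=158.
-- Loop state: none = a KeyError already occurred; some none = center_point still unbound;
-- some (some cp) = center_point bound to cp.  (Error states are excluded by Pre_.)
def command_direction (rects : List (List (String × Int))) : Option Int :=
  let st : Option (Option (Int × Int)) := rects.foldl (fun acc rect =>
    match acc with
    | none => none
    | some _ =>
      match (PySem.Dict.mk rect).get? "cx", (PySem.Dict.mk rect).get? "cy" with
      | some cx, some cy => some (some (cx, cy))
      | _, _ => none) (some none)
  match st with
  | some (some cp) =>
      if cp.1 ≤ 105 ∧ cp.2 ≤ 79 then some 171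
      else if cp.1 ≤ 211 ∧ cp.2 ≤ 79 then some 172
      else if cp.1 ≤ 320 ∧ cp.2 ≤ 79 then some 173
      else if cp.1 ≤ 105 ∧ cp.2 ≤ 158 then some 174
      else if cp.1 ≤ 211 ∧ cp.2 ≤ 158 then some 175
      else if cp.1 ≤ 320 ∧ cp.2 ≤ 158 then some 176
      else if cp.1 ≤ 105 ∧ cp.2 ≤ 240 then some 177
      else if cp.1 ≤ 211 ∧ cp.2 ≤ 240 then some 178
      else if cp.1 ≤ 320 ∧ cp.2 ≤ 240 then some 179
      else none
  | _ => none   -- UnboundLocalError (empty rects) or KeyError; excluded by Pre_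

-- ===== PORT B =====
-- none = rects[-1] IndexError / rect['cx'] KeyError on the last rect (both excluded by Pre_);
-- the two findIdx? are B's next(...) searches, none there = Python's None fall-through.
def command_direction_alt (rects : List (List (String × Int))) : Option Int :=
  (PySem.List.pyGet? rects (-1)).bind fun rect =>
    ((PySem.Dict.mk rect).get? "cx").bind fun cx =>
      ((PySem.Dict.mk rect).get? "cy").bind fun cy =>
        let cols : List Int := [105, 211, 320]
        let rows : List Int := [79, 158, 240]
        (cols.findIdx? (fun t => decide (cx ≤ t))).bind fun col =>
          (rows.findIdx? (fun t => decide (cy ≤ t))).map fun row =>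
            171 + 3 * (row : Int) + (col : Int)

-- ===== PRECONDITION & SPEC =====
-- A raises UnboundLocalError on empty rects and KeyError when any rect lacks key 'cx' or 'cy';
-- Pre_ excludes exactly those inputs.
def Pre_command_direction (rects : List (List (String × Int))) : Prop :=
  rects ≠ [] ∧ ∀ r ∈ rects,
    ((PySem.Dict.mk r).get? "cx").isSome = true ∧ ((PySem.Dict.mk r).get? "cy").isSome = true
instance (rects : List (List (String × Int))) : Decidable (Pre_command_direction rects) := by
  unfold Pre_command_direction; infer_instance
def pvWitness_command_direction : (List (List (String × Int))) := [[("cx", 10), ("cy", 200)]]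

def Spec_command_direction (rects : List (List (String × Int))) (out : Option Int) : Prop := out = command_direction_alt rects
instance (rects : List (List (String × Int))) (out : Option Int) : Decidable (Spec_command_direction rects out) := by unfold Spec_command_direction; infer_instance

-- ===== CLAIM (what is proved, stated in full; the proofs are below) =====
def Claim_equal_command_direction : Prop := ∀ (rects : List (List (String × Int))), Dom_command_direction rects → Pre_command_direction rects → Spec_command_direction rects (command_direction rects)

-- ===== LEMMAS AND PROOFS =====

-- the loop body of port A
def pvStepA (acc : Option (Option (Int × Int))) (rect : List (String × Int)) : Option (Option (Int × Int)) :=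
  match acc with
  | none => none
  | some _ =>
    match (PySem.Dict.mk rect).get? "cx", (PySem.Dict.mk rect).get? "cy" with
    | some cx, some cy => some (some (cx, cy))
    | _, _ => none

lemma foldA_ne_none (rects : List (List (String × Int)))
    (h : ∀ r ∈ rects, ((PySem.Dict.mk r).get? "cx").isSome = true ∧ ((PySem.Dict.mk r).get? "cy").isSome = true)
    (init : Option (Int × Int)) :
    rects.foldl pvStepA (some init) ≠ none := by
  induction rects generalizing init with
  | nil => simp
  | cons r rs ih =>
    obtain ⟨hx, hy⟩ := h r (by simp)
    obtain ⟨cx, hcx⟩ := Option.isSome_iff_exists.mp hx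
    obtain ⟨cy, hcy⟩ := Option.isSome_iff_exists.mp hy
    simpa [pvStepA, hcx, hcy] using ih (fun r hr => h r (by simp [hr])) (some (cx, cy))

lemma colIdx_eq (cx : Int) : ([105,211,320] : List Int).findIdx? (fun t => decide (cx ≤ t)) =
    (if cx ≤ 105 then some 0 else if cx ≤ 211 then some 1 else if cx ≤ 320 then some 2 else none) := by
  simp only [List.findIdx?_cons, List.findIdx?_nil, Option.map_none]
  split_ifs <;> simp_all

lemma rowIdx_eq (cy : Int) : ([79,158,240] : List Int).findIdx? (fun t => decide (cy ≤ t)) =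
    (if cy ≤ 79 then some 0 else if cy ≤ 158 then some 1 else if cy ≤ 240 then some 2 else none) := by
  simp only [List.findIdx?_cons, List.findIdx?_nil, Option.map_none]
  split_ifs <;> simp_all

lemma branch_eq (cx cy : Int) :
    (if cx ≤ 105 ∧ cy ≤ 79 then some (171 : Int)
     else if cx ≤ 211 ∧ cy ≤ 79 then some 172
     else if cx ≤ 320 ∧ cy ≤ 79 then some 173
     else if cx ≤ 105 ∧ cy ≤ 158 then some 174
     else if cx ≤ 211 ∧ cy ≤ 158 then some 175
     else if cx ≤ 320 ∧ cy ≤ 158 then some 176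
     else if cx ≤ 105 ∧ cy ≤ 240 then some 177
     else if cx ≤ 211 ∧ cy ≤ 240 then some 178
     else if cx ≤ 320 ∧ cy ≤ 240 then some 179
     else none) =
    ((([105, 211, 320] : List Int).findIdx? (fun t => decide (cx ≤ t))).bind fun col =>
      (([79, 158, 240] : List Int).findIdx? (fun t => decide (cy ≤ t))).map fun row =>
        171 + 3 * (row : Int) + (col : Int)) := by
  rw [colIdx_eq, rowIdx_eq]
  split_ifs <;> simp <;> omega

-- ===== VERDICT (by name: the statement is the Claim_ definition above) =====
theorem command_direction_spec : Claim_equal_command_direction := by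
  intro rects _dom hpre
  obtain ⟨hne, hall⟩ := hpre
  rcases List.eq_nil_or_concat rects with rfl | ⟨xs, r, rfl⟩
  · exact absurd rfl hne
  · obtain ⟨hx, hy⟩ := hall r (by simp)
    obtain ⟨cx, hcx⟩ := Option.isSome_iff_exists.mp hx
    obtain ⟨cy, hcy⟩ := Option.isSome_iff_exists.mp hy
    have hfold : (xs ++ [r]).foldl pvStepA (some none) = some (some (cx, cy)) := by
      rw [List.foldl_concat]
      rcases hst : xs.foldl pvStepA (some none) with _ | s
      · exact absurd hst (foldA_ne_none xs (fun r' hr' => hall r' (by simp [hr'])) none)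
      · simp [pvStepA, hcx, hcy]
    simp only [List.concat_eq_append] at *
    unfold Spec_command_direction command_direction command_direction_alt
    rw [show (fun acc rect => match acc with
        | none => none
        | some _ =>
          match (PySem.Dict.mk rect).get? "cx", (PySem.Dict.mk rect).get? "cy" with
          | some cx, some cy => some (some (cx, cy))
          | _, _ => none) = pvStepA from rfl]
    rw [hfold, PySem.List.pyGet?_neg_one_append_singleton]
    simp only [Option.bind_some, hcx, hcy]
    exact branch_eq cx cy
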